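-- pv_equiv track=rewrite | github.com/pypi-data/pypi-mirror-367 | packages/coppersun-brass/coppersun_brass-2.5.8.tar.gz/coppersun_brass-2.5.8/src/coppersun_brass/core/context/agent_permissions.py | validate_agent_permission
-- ===== SOURCE A (Python) =====
-- AGENT_PERMISSIONS = {
--     "claude": {
--         "can_edit": ["priority", "status", "claude_annotation", "effectiveness_score"],
--         "can_create": [],
--         "can_delete": []
--     },
--     "watch": {
--         "can_edit": ["summary", "type"],
--         "can_create": ["current_observations"],
--         "can_delete": []
--     },
--     "scout": {
--         "can_edit": ["priority", "summary"],
--         "can_create": ["current_observations"],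
--         "can_delete": []
--     },
--     "human": {
--         "can_edit": ["*"],  # Full access
--         "can_create": ["*"],
--         "can_delete": ["*"]
--     }
-- }
--
-- def validate_agent_permission(agent_id, operation, field_path):
--     """Check if agent has permission for operation
--
--     Args:
--         agent_id: Agent identifier (claude, watch, scout, human)
--         operation: Operation type (edit, create, delete)
--         field_path: Dot-separated path to field
--
--     Returns:
--         bool: True if permitted, False otherwise
--     """
--     permissions = AGENT_PERMISSIONS.get(agent_id, {})
--
--     if operation == "edit":
--         allowed_fields = permissions.get("can_edit", [])
--     elif operation == "create":
--         allowed_fields = permissions.get("can_create", [])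
--     elif operation == "delete":
--         allowed_fields = permissions.get("can_delete", [])
--     else:
--         return False
--
--     # Full access check
--     if "*" in allowed_fields:
--         return True
--
--     # Check if any allowed field matches the path
--     for allowed in allowed_fields:
--         # Exact match or proper prefix with delimiter
--         if field_path == allowed:
--             return True
--         # Check if it's a proper sub-field (not partial match)
--         if field_path.startswith(allowed + "."):
--             return True
--
--     return False
-- ===== SOURCE B (Python) =====
-- PERMISSION_TABLE = {
--     ("claude", "edit"): {"priority", "status", "claude_annotation", "effectiveness_score"},
--     ("claude", "create"): set(),
--     ("claude", "delete"): set(),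
--     ("watch", "edit"): {"summary", "type"},
--     ("watch", "create"): {"current_observations"},
--     ("watch", "delete"): set(),
--     ("scout", "edit"): {"priority", "summary"},
--     ("scout", "create"): {"current_observations"},
--     ("scout", "delete"): set(),
--     ("human", "edit"): {"*"},
--     ("human", "create"): {"*"},
--     ("human", "delete"): {"*"},
-- }
--
--
-- def validate_agent_permission(agent_id, operation, field_path):
--     """Check if agent has permission for operation.
--
--     Flat (agent, operation)-keyed table of allowed-field sets; one pass over
--     the path's characters checks each dotted prefix against the set.
--     """
--     allowed = PERMISSION_TABLE.get((agent_id, operation))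
--     if allowed is None:
--         return False
--     if "*" in allowed:
--         return True
--     prefix = []
--     for ch in field_path:
--         if ch == "." and "".join(prefix) in allowed:
--             return True
--         prefix.append(ch)
--     return field_path in allowed
-- ===== Notes on version B (the rewrite author's own statement) =====
-- stated objective: alternative
-- what changed: B replaces A's nested per-agent dict plus operation if-chain by one flat table keyed by (agent, operation) mapping to a set, and replaces A's scan of the allowed list with equality/startswith tests per entry by a single pass over the path's characters that checks each dotted prefix (and finally the full path) for membership in that set.
import Mathlib
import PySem

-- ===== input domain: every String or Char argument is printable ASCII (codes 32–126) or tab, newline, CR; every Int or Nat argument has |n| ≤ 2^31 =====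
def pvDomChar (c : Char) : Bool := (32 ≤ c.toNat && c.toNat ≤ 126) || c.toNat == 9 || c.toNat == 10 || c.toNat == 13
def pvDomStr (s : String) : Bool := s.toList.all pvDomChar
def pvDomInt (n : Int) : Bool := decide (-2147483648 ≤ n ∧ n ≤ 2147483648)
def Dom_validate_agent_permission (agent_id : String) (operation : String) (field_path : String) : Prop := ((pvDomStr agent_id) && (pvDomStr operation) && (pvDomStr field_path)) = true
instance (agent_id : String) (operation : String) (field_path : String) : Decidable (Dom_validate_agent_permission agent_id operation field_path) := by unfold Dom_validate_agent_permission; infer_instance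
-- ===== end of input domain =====

-- B replaces A's nested dict + operation if-chain + scan of the allowed list (equality/startswith per
-- entry) by a flat (agent, operation)-keyed table of sets and one pass over the path's characters
-- checking each dotted prefix; return values are identical (objective: alternative algorithm).

-- ===== PORT A =====
-- module-level constant AGENT_PERMISSIONS of A's module
def AGENT_PERMISSIONS : PySem.Dict String (PySem.Dict String (List String)) :=
  PySem.Dict.mk [
    ("claude", PySem.Dict.mk [
      ("can_edit", ["priority", "status", "claude_annotation", "effectiveness_score"]),
      ("can_create", []),
      ("can_delete", [])]),
    ("watch", PySem.Dict.mk [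
      ("can_edit", ["summary", "type"]),
      ("can_create", ["current_observations"]),
      ("can_delete", [])]),
    ("scout", PySem.Dict.mk [
      ("can_edit", ["priority", "summary"]),
      ("can_create", ["current_observations"]),
      ("can_delete", [])]),
    ("human", PySem.Dict.mk [
      ("can_edit", ["*"]),
      ("can_create", ["*"]),
      ("can_delete", ["*"])])]

-- A's operation dispatch: pick the allowed list; none = unknown operation (return False)
def pvDispatchA (agent_id : String) (operation : String) : Option (List String) :=
  let permissions := (AGENT_PERMISSIONS.get? agent_id).getD (PySem.Dict.mk [])
  if operation == "edit" then some (permissions.getD "can_edit" [])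
  else if operation == "create" then some (permissions.getD "can_create" [])
  else if operation == "delete" then some (permissions.getD "can_delete" [])
  else none

-- A's tail after the dispatch: '*' check, then the for-loop over allowed with early return (= List.any)
def pvCheckA (allowed_fields : List String) (field_path : String) : Bool :=
  if allowed_fields.contains "*" then true
  else allowed_fields.any (fun allowed =>
    field_path == allowed || PySem.Str.startswith field_path (allowed ++ "."))

def validate_agent_permission (agent_id : String) (operation : String) (field_path : String) : Bool :=
  match pvDispatchA agent_id operation with
  | none => false                    -- unknown operation: return False
  | some allowed_fields => pvCheckA allowed_fields field_path

-- ===== PORT B =====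
-- Source B's module-level flat table: (agent, operation) ↦ set of allowed fields
def PERMISSION_TABLE : PySem.Dict (String × String) (PySem.Set String) :=
  PySem.Dict.mk [
    (("claude", "edit"), PySem.Set.ofList ["priority", "status", "claude_annotation", "effectiveness_score"]),
    (("claude", "create"), PySem.Set.ofList []),
    (("claude", "delete"), PySem.Set.ofList []),
    (("watch", "edit"), PySem.Set.ofList ["summary", "type"]),
    (("watch", "create"), PySem.Set.ofList ["current_observations"]),
    (("watch", "delete"), PySem.Set.ofList []),
    (("scout", "edit"), PySem.Set.ofList ["priority", "summary"]),
    (("scout", "create"), PySem.Set.ofList ["current_observations"]),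
    (("scout", "delete"), PySem.Set.ofList []),
    (("human", "edit"), PySem.Set.ofList ["*"]),
    (("human", "create"), PySem.Set.ofList ["*"]),
    (("human", "delete"), PySem.Set.ofList ["*"])]

-- Source B's for-loop over field_path's characters; acc is the 'prefix' list of chars seen so far
def pvScanB (allowed : PySem.Set String) (field_path : String) : List Char → List Char → Bool
  | _, [] => PySem.Set.contains allowed field_path
  | acc, c :: rest =>
    if c == '.' && PySem.Set.contains allowed (String.ofList acc) then true
    else pvScanB allowed field_path (acc ++ [c]) rest

def validate_agent_permission_alt (agent_id : String) (operation : String) (field_path : String) : Bool :=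
  match PERMISSION_TABLE.get? (agent_id, operation) with
  | none => false                    -- no table entry: return False
  | some allowed =>
    if PySem.Set.contains allowed "*" then true
    else pvScanB allowed field_path [] field_path.toList

-- ===== PRECONDITION & SPEC =====
def Spec_validate_agent_permission (agent_id : String) (operation : String) (field_path : String) (out : Bool) : Prop := out = validate_agent_permission_alt agent_id operation field_path
instance (agent_id : String) (operation : String) (field_path : String) (out : Bool) : Decidable (Spec_validate_agent_permission agent_id operation field_path out) := by unfold Spec_validate_agent_permission; infer_instance

-- ===== CLAIM (what is proved, stated in full; the proofs are below) =====
def Claim_equal_validate_agent_permission : Prop := ∀ (agent_id : String) (operation : String) (field_path : String), Dom_validate_agent_permission agent_id operation field_path → Spec_validate_agent_permission agent_id operation field_path (validate_agent_permission agent_id operation field_path)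

-- ===== LEMMAS AND PROOFS =====

-- "al followed by '.' is a prefix of cs" ↔ "al is the part of cs before some '.' at index k"
lemma prefix_dot_iff (cs al : List Char) :
    (al ++ ['.']) <+: cs ↔ ∃ k, ∃ (_ : k < cs.length), cs[k] = '.' ∧ al = cs.take k := by
  constructor
  · intro h
    have hlen : al.length + 1 ≤ cs.length := by simpa using h.length_le
    refine ⟨al.length, by omega, ?_, ?_⟩
    · have := h.getElem (i := al.length) (by simp)
      simpa using this.symm
    · exact List.prefix_iff_eq_take.mp (List.IsPrefix.trans ⟨['.'], rfl⟩ h)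
  · rintro ⟨k, hk, hdot, rfl⟩
    refine ⟨cs.drop (k+1), ?_⟩
    calc cs.take k ++ ['.'] ++ cs.drop (k+1)
        = cs.take k ++ (cs[k] :: cs.drop (k+1)) := by simp [hdot]
      _ = cs.take k ++ cs.drop k := by rw [List.getElem_cons_drop]
      _ = cs := by simp

-- what B's character loop returns: the full path is allowed, or some prefix ending at a '.' is
lemma scanB_spec (allowed : PySem.Set String) (fp : String) (rest acc : List Char) :
    pvScanB allowed fp acc rest = true ↔
      PySem.Set.contains allowed fp = true ∨
      ∃ i, ∃ (_ : i < rest.length), rest[i] = '.' ∧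
        PySem.Set.contains allowed (String.ofList (acc ++ rest.take i)) = true := by
  induction rest generalizing acc with
  | nil => simp [pvScanB]
  | cons c t ih =>
    rw [pvScanB]
    by_cases hhit : (c == '.' && PySem.Set.contains allowed (String.ofList acc)) = true
    · rw [if_pos hhit]
      simp only [Bool.and_eq_true, beq_iff_eq] at hhit
      obtain ⟨rfl, hmem⟩ := hhit
      constructor
      · intro _
        exact Or.inr ⟨0, by simp, by simp, by simpa using hmem⟩
      · intro _; rfl
    · rw [if_neg hhit, ih]
      constructor
      · rintro (h | ⟨i, hi, hdot, hmem⟩)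
        · exact Or.inl h
        · exact Or.inr ⟨i + 1, by simpa using hi, by simpa using hdot, by simpa using hmem⟩
      · rintro (h | ⟨i, hi, hdot, hmem⟩)
        · exact Or.inl h
        · cases i with
          | zero =>
            exfalso
            apply hhit
            simp only [List.getElem_cons_zero] at hdot
            simp only [List.take_zero, List.append_nil] at hmem
            simp only [hdot]
            simpa [PySem.Set.contains] using hmem
          | succ j =>
            refine Or.inr ⟨j, by simpa using hi, by simpa using hdot, ?_⟩
            simpa using hmem

-- A's tail equals B's tail, for any allowed list and any path
lemma check_eq (fs : List String) (s : String) :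
    pvCheckA fs s =
      (if PySem.Set.contains (PySem.Set.ofList fs) "*" then true
       else pvScanB (PySem.Set.ofList fs) s [] s.toList) := by
  have hcontains : ∀ x : String, PySem.Set.contains (PySem.Set.ofList fs) x = fs.contains x := by
    intro x
    simp [PySem.Set.contains, PySem.Set.mem_ofList, List.contains_eq_mem]
  by_cases hstar : ("*" : String) ∈ fs
  · simp [pvCheckA, hstar, List.contains_eq_mem]
  · rw [if_neg (by simp [List.contains_eq_mem, hstar])]
    unfold pvCheckA
    rw [if_neg (by simp [List.contains_eq_mem, hstar])]
    rw [Bool.eq_iff_iff, scanB_spec]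
    simp only [List.any_eq_true, List.nil_append]
    constructor
    · rintro ⟨al, hal, hmatch⟩
      rcases (Bool.or_eq_true _ _).mp hmatch with h | h
      · exact Or.inl (by rw [hcontains, List.contains_eq_mem]; simpa using (beq_iff_eq.mp h) ▸ hal)
      · right
        rw [PySem.Str.startswith_eq, PySem.Chars.startswith_iff] at h
        have h' : (al.toList ++ ['.']) <+: s.toList := by simpa [String.toList_append] using h
        obtain ⟨k, hk, hdot, htake⟩ := (prefix_dot_iff _ _).mp h'
        refine ⟨k, hk, hdot, ?_⟩
        rw [hcontains, List.contains_eq_mem]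
        have : String.ofList (s.toList.take k) = al := by
          apply String.toList_injective; simp [htake.symm]
        simpa [this] using hal
    · rintro (h | ⟨k, hk, hdot, hmem⟩)
      · rw [hcontains, List.contains_eq_mem] at h
        exact ⟨s, by simpa using h, by simp⟩
      · rw [hcontains, List.contains_eq_mem] at hmem
        refine ⟨String.ofList (s.toList.take k), by simpa using hmem, ?_⟩
        apply (Bool.or_eq_true _ _).mpr
        right
        rw [PySem.Str.startswith_eq, PySem.Chars.startswith_iff]
        rw [show (String.ofList (s.toList.take k) ++ ".").toList = s.toList.take k ++ ['.'] by
          simp [String.toList_append]]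
        exact (prefix_dot_iff _ _).mpr ⟨k, hk, hdot, rfl⟩

-- both ports reduce to their tails on a known (agent, operation) pair
lemma knownPair (a o : String) (fs : List String)
    (hA : pvDispatchA a o = some fs)
    (hB : PERMISSION_TABLE.get? (a, o) = some (PySem.Set.ofList fs)) (p : String) :
    validate_agent_permission a o p = validate_agent_permission_alt a o p := by
  unfold validate_agent_permission validate_agent_permission_alt
  rw [hA, hB]
  exact check_eq fs p

-- an unknown agent with a known operation: A scans the empty list, B finds no table entry
lemma unknownAgent (a o : String) (h1 : a ≠ "claude") (h2 : a ≠ "watch") (h3 : a ≠ "scout")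
    (h4 : a ≠ "human") (ho : o = "edit" ∨ o = "create" ∨ o = "delete") (p : String) :
    validate_agent_permission a o p = validate_agent_permission_alt a o p := by
  have ef : ∀ x y : String, x ≠ a → (((x, y) : String × String) == (a, o)) = false := by
    intro x y hx
    simp only [beq_eq_false_iff_ne, ne_eq, Prod.mk.injEq, not_and]
    intro hxa; exact absurd hxa hx
  have hB : PERMISSION_TABLE.get? (a, o) = none := by
    simp [PERMISSION_TABLE, PySem.Dict.get?, List.find?,
      ef _ _ (Ne.symm h1), ef _ _ (Ne.symm h2), ef _ _ (Ne.symm h3), ef _ _ (Ne.symm h4)]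
  have es : ∀ x : String, x ≠ a → (x == a) = false := fun x hx => beq_eq_false_iff_ne.mpr hx
  have hget : AGENT_PERMISSIONS.get? a = none := by
    simp [AGENT_PERMISSIONS, PySem.Dict.get?, List.find?,
      es _ (Ne.symm h1), es _ (Ne.symm h2), es _ (Ne.symm h3), es _ (Ne.symm h4)]
  unfold validate_agent_permission validate_agent_permission_alt pvDispatchA
  rw [hB, hget]
  rcases ho with rfl | rfl | rfl <;> simp [PySem.Dict.getD, PySem.Dict.get?, pvCheckA]

-- an unknown operation: A's if-chain falls through, B finds no table entry
lemma unknownOp (a o : String) (h1 : o ≠ "edit") (h2 : o ≠ "create") (h3 : o ≠ "delete")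
    (p : String) : validate_agent_permission a o p = validate_agent_permission_alt a o p := by
  have eg : ∀ x y : String, y ≠ o → (((x, y) : String × String) == (a, o)) = false := by
    intro x y hy
    simp only [beq_eq_false_iff_ne, ne_eq, Prod.mk.injEq, not_and]
    intro _ hyo; exact absurd hyo hy
  have hB : PERMISSION_TABLE.get? (a, o) = none := by
    simp [PERMISSION_TABLE, PySem.Dict.get?, List.find?,
      eg _ _ (Ne.symm h1), eg _ _ (Ne.symm h2), eg _ _ (Ne.symm h3)]
  unfold validate_agent_permission validate_agent_permission_alt pvDispatchA
  rw [hB]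
  simp [h1, h2, h3]

-- ===== VERDICT (by name: the statement is the Claim_ definition above) =====
theorem validate_agent_permission_spec : Claim_equal_validate_agent_permission := by
  intro a o p _
  unfold Spec_validate_agent_permission
  by_cases ho1 : o = "edit"
  case pos =>
    subst ho1
    by_cases h1 : a = "claude"
    · subst h1; exact knownPair _ _ _ rfl rfl p
    by_cases h2 : a = "watch"
    · subst h2; exact knownPair _ _ _ rfl rfl p
    by_cases h3 : a = "scout"
    · subst h3; exact knownPair _ _ _ rfl rfl p
    by_cases h4 : a = "human"
    · subst h4; exact knownPair _ _ _ rfl rfl p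
    exact unknownAgent a _ h1 h2 h3 h4 (Or.inl rfl) p
  case neg =>
    by_cases ho2 : o = "create"
    case pos =>
      subst ho2
      by_cases h1 : a = "claude"
      · subst h1; exact knownPair _ _ _ rfl rfl p
      by_cases h2 : a = "watch"
      · subst h2; exact knownPair _ _ _ rfl rfl p
      by_cases h3 : a = "scout"
      · subst h3; exact knownPair _ _ _ rfl rfl p
      by_cases h4 : a = "human"
      · subst h4; exact knownPair _ _ _ rfl rfl p
      exact unknownAgent a _ h1 h2 h3 h4 (Or.inr (Or.inl rfl)) p
    case neg =>
      by_cases ho3 : o = "delete"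
      case pos =>
        subst ho3
        by_cases h1 : a = "claude"
        · subst h1; exact knownPair _ _ _ rfl rfl p
        by_cases h2 : a = "watch"
        · subst h2; exact knownPair _ _ _ rfl rfl p
        by_cases h3 : a = "scout"
        · subst h3; exact knownPair _ _ _ rfl rfl p
        by_cases h4 : a = "human"
        · subst h4; exact knownPair _ _ _ rfl rfl p
        exact unknownAgent a _ h1 h2 h3 h4 (Or.inr (Or.inr rfl)) p
      case neg =>
        exact unknownOp a o ho1 ho2 ho3 p
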